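-- pv_equiv track=rewrite | github.com/anbra120/thesis | src/Punctuation.py | count
-- ===== SOURCE A (Python) =====
-- def count(data):
--     point = []
--     comma = []
--     q_mark = []
--     ex_mark = []
--
--     for article in data:
--         point.append(article.count("."))
--         comma.append(article.count(","))
--         q_mark.append(article.count("?"))
--         ex_mark.append(article.count("!"))
--
--     return point, comma, q_mark, ex_mark
-- ===== SOURCE B (Python) =====
-- def count(data):
--     def tally(article):
--         p = c = q = e = 0
--         for ch in article:
--             if ch == '.':
--                 p += 1
--             elif ch == ',':
--                 c += 1
--             elif ch == '?':
--                 q += 1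
--             elif ch == '!':
--                 e += 1
--         return p, c, q, e
--
--     quads = [tally(article) for article in data]
--     return ([t[0] for t in quads], [t[1] for t in quads],
--             [t[2] for t in quads], [t[3] for t in quads])
-- ===== Notes on version B (the rewrite author's own statement) =====
-- stated objective: alternative
-- what changed: B tallies all four punctuation counts in a single character-level pass per article with a 4-counter accumulator, collects one quadruple per article, and transposes the list of quadruples into four lists at the end, instead of A's four separate str.count scans feeding four parallel growing lists.
import Mathlib
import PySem

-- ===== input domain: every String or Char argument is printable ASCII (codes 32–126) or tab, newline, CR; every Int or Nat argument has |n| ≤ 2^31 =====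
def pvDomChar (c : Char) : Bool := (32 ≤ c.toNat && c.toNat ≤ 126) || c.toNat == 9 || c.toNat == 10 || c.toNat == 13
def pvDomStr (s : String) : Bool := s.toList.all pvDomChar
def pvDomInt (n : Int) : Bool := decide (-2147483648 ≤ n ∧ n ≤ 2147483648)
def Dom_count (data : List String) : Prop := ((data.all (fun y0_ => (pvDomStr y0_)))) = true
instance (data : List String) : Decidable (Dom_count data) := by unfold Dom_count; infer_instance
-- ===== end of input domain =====

-- B tallies all four punctuation counts in one character-level pass per article (4-counter accumulator), collects one quadruple per article, and transposes at the end, instead of A's four str.count scans feeding four parallel lists.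


-- ===== PORT A =====
-- A: four growing lists; each article is scanned four times with str.count.
def count (data : List String) : List Int × List Int × List Int × List Int :=
  let st := data.foldl
    (fun (st : List Int × List Int × List Int × List Int) article =>
      (st.1 ++ [(PySem.Str.count article "." : Int)],
       st.2.1 ++ [(PySem.Str.count article "," : Int)],
       st.2.2.1 ++ [(PySem.Str.count article "?" : Int)],
       st.2.2.2 ++ [(PySem.Str.count article "!" : Int)]))
    ([], [], [], [])
  st

-- ===== PORT B =====
-- B: one pass per article with a 4-counter accumulator (if/elif chain), then a transpose of the quadruples.
def tallyStep (s : Int × Int × Int × Int) (ch : Char) : Int × Int × Int × Int :=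
  if ch = '.' then (s.1 + 1, s.2.1, s.2.2.1, s.2.2.2)
  else if ch = ',' then (s.1, s.2.1 + 1, s.2.2.1, s.2.2.2)
  else if ch = '?' then (s.1, s.2.1, s.2.2.1 + 1, s.2.2.2)
  else if ch = '!' then (s.1, s.2.1, s.2.2.1, s.2.2.2 + 1)
  else s

def tally (article : String) : Int × Int × Int × Int :=
  article.toList.foldl tallyStep (0, 0, 0, 0)

def count_alt (data : List String) : List Int × List Int × List Int × List Int :=
  let quads := data.map tally
  (quads.map (fun t => t.1), quads.map (fun t => t.2.1),
   quads.map (fun t => t.2.2.1), quads.map (fun t => t.2.2.2))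

-- ===== PRECONDITION & SPEC =====
def Spec_count (data : List String) (out : List Int × List Int × List Int × List Int) : Prop := out = count_alt data
instance (data : List String) (out : List Int × List Int × List Int × List Int) : Decidable (Spec_count data out) := by unfold Spec_count; infer_instance

-- ===== CLAIM (what is proved, stated in full; the proofs are below) =====
def Claim_equal_count : Prop := ∀ (data : List String), Dom_count data → Spec_count data (count data)

-- ===== LEMMAS AND PROOFS =====

-- substring count of a single character equals the character count
theorem chars_count_go_singleton (c : Char) (l : List Char) (fuel acc : Nat)
    (h : l.length ≤ fuel) :
    PySem.Chars.count.go [c] fuel l acc = acc + l.count c := by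
  induction fuel generalizing l acc with
  | zero =>
    have : l = [] := List.length_eq_zero_iff.mp (Nat.le_zero.mp h)
    subst this; simp [PySem.Chars.count.go]
  | succ n ih =>
    cases l with
    | nil => simp [PySem.Chars.count.go]
    | cons hd t =>
      simp only [PySem.Chars.count.go]
      by_cases hc : c = hd
      · subst hc
        have hpre : [c].isPrefixOf (c :: t) = true := by simp [List.isPrefixOf]
        rw [if_pos hpre]
        simp only [List.length_singleton, List.drop_one, List.tail_cons]
        rw [ih t (acc + 1) (by simpa using Nat.le_of_succ_le_succ h)]
        simp only [List.count_cons, beq_self_eq_true, if_true]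
        omega
      · have hpre : [c].isPrefixOf (hd :: t) = false := by
          simp [List.isPrefixOf, hc]
        rw [if_neg (by simp [hpre])]
        rw [ih t acc (by simpa using Nat.le_of_succ_le_succ h)]
        simp only [List.count_cons]
        simp only [beq_iff_eq]
        rw [if_neg (fun h' => hc h'.symm)]
        simp

theorem str_count_singleton (s : String) (c : Char) :
    PySem.Str.count s (String.ofList [c]) = s.toList.count c := by
  rw [PySem.Str.count_eq]
  simp only [String.toList_ofList]
  rw [PySem.Chars.count]
  simp only [List.isEmpty_cons, Bool.false_eq_true, if_false]
  exact chars_count_go_singleton c s.toList s.toList.length 0 (le_refl _) |>.trans (by omega)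

-- the single-pass tally accumulates the four character counts
theorem tally_foldl (l : List Char) (p c q e : Int) :
    l.foldl tallyStep (p, c, q, e) =
      (p + l.count '.', c + l.count ',', q + l.count '?', e + l.count '!') := by
  induction l generalizing p c q e with
  | nil => simp
  | cons hd t ih =>
    simp only [List.foldl_cons, tallyStep]
    split_ifs with h1 h2 h3 h4 <;> subst_vars <;> rw [ih] <;>
      refine Prod.ext ?_ (Prod.ext ?_ (Prod.ext ?_ ?_)) <;>
      · simp only [List.count_cons]
        split_ifs with hb <;> simp_all <;> omega

theorem tally_eq (s : String) :
    tally s = ((PySem.Str.count s "." : Int), (PySem.Str.count s "," : Int),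
               (PySem.Str.count s "?" : Int), (PySem.Str.count s "!" : Int)) := by
  unfold tally
  rw [tally_foldl]
  have h1 := str_count_singleton s '.'
  have h2 := str_count_singleton s ','
  have h3 := str_count_singleton s '?'
  have h4 := str_count_singleton s '!'
  simp only [show String.ofList ['.'] = "." from rfl, show String.ofList [','] = "," from rfl,
    show String.ofList ['?'] = "?" from rfl, show String.ofList ['!'] = "!" from rfl] at h1 h2 h3 h4
  rw [h1, h2, h3, h4]
  simp

-- A's four-parallel-list fold is the transpose of the per-article quadruples
theorem count_foldl_map (data : List String) (st : List Int × List Int × List Int × List Int) :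
    data.foldl
      (fun (st : List Int × List Int × List Int × List Int) article =>
        (st.1 ++ [(PySem.Str.count article "." : Int)],
         st.2.1 ++ [(PySem.Str.count article "," : Int)],
         st.2.2.1 ++ [(PySem.Str.count article "?" : Int)],
         st.2.2.2 ++ [(PySem.Str.count article "!" : Int)])) st =
    (st.1 ++ (data.map tally).map (fun t => t.1),
     st.2.1 ++ (data.map tally).map (fun t => t.2.1),
     st.2.2.1 ++ (data.map tally).map (fun t => t.2.2.1),
     st.2.2.2 ++ (data.map tally).map (fun t => t.2.2.2)) := by
  induction data generalizing st with
  | nil => simp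
  | cons a t ih =>
    simp only [List.foldl_cons, List.map_cons, List.map]
    rw [ih]
    simp [tally_eq a]

-- ===== VERDICT (by name: the statement is the Claim_ definition above) =====
theorem count_spec : Claim_equal_count := by
  intro data _
  show count data = count_alt data
  unfold count count_alt
  simp only []
  rw [count_foldl_map]
  simp
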